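-- pv_equiv track=rewrite | github.com/APT-Finder/Sensemaker | 2.Code/Sensemaker/Semantic-Structural Attributor/tools_aug.py | build_siblings
-- ===== SOURCE A (Python) =====
-- from collections import Counter, defaultdict
-- from typing import List, Dict, Any, Optional
--
-- def build_siblings(group_chains: Dict[str, List[List[str]]]) -> Dict[str, List[str]]:
--     parent2child=defaultdict(set)
--     for chains in group_chains.values():
--         for c in chains:
--             for t in c:
--                 p=t.split('.')[0]
--                 if '.' in t: parent2child[p].add(t)
--     return {p: sorted(list(s)) for p,s in parent2child.items()}
-- ===== SOURCE B (Python) =====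
-- def build_siblings(group_chains):
--     toks = [t for chains in group_chains.values() for c in chains for t in c if '.' in t]
--     ordered = sorted(set(toks))
--     parents = list(dict.fromkeys(t.split('.')[0] for t in toks))
--     return {p: [t for t in ordered if t.split('.')[0] == p] for p in parents}
-- ===== Notes on version B (the rewrite author's own statement) =====
-- stated objective: alternative
-- what changed: B flattens all dotted tokens once, sorts the deduplicated token set once globally, and builds each parent's (already sorted) children by filtering that one sorted list per first-occurrence parent, instead of A's per-parent mutable sets each sorted separately.
import Mathlib
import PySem

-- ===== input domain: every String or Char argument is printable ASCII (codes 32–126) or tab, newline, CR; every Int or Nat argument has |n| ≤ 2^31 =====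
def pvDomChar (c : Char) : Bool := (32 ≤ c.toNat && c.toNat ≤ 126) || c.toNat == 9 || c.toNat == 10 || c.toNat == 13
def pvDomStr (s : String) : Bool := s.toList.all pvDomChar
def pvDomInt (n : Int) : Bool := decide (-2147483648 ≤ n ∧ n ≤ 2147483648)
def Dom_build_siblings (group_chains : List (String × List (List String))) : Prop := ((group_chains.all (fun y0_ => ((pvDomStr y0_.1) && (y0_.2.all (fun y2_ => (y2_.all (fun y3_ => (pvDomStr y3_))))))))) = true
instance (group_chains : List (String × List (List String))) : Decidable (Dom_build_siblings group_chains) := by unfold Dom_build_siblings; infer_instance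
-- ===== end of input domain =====

-- B groups differently: one flatten of the dotted tokens, one global sort of their set, then
-- each parent's children are taken from that single sorted list (objective: alternative decomposition).

-- shared helper: t.split('.')[0] — split? is some for the non-empty separator "." and the
-- result of split is never empty, so neither default is ever taken (exact port of t.split('.')[0])
def pvPrefix (t : String) : String := ((PySem.Str.split? t ".").getD []).headD ""

-- ===== PORT A =====
def build_siblings (group_chains : List (String × List (List String))) : List (String × List String) :=
  let parent2child : PySem.Dict String (List String) :=
    group_chains.foldl (fun d pr =>
      pr.2.foldl (fun d c =>
        c.foldl (fun d t =>
          if PySem.Str.isIn "." t then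
            PySem.Dict.modify d (pvPrefix t) [] (fun s => PySem.Set.add s t)
          else d) d) d) PySem.Dict.empty
  parent2child.items.map (fun pv => (pv.1, PySem.List.sorted pv.2 (fun x => x) false))

-- ===== PORT B =====
def build_siblings_alt (group_chains : List (String × List (List String))) : List (String × List String) :=
  let toks := group_chains.flatMap (fun pr => pr.2.flatMap (fun c => c.filter (fun t => PySem.Str.isIn "." t)))
  let ordered := PySem.List.sorted (PySem.Set.ofList toks) (fun x => x) false
  let parents := PySem.List.dedup (toks.map pvPrefix)
  parents.map (fun p => (p, ordered.filter (fun t => pvPrefix t == p)))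

-- ===== PRECONDITION & SPEC =====
def Spec_build_siblings (group_chains : List (String × List (List String))) (out : List (String × List String)) : Prop := out = build_siblings_alt group_chains
instance (group_chains : List (String × List (List String))) (out : List (String × List String)) : Decidable (Spec_build_siblings group_chains out) := by unfold Spec_build_siblings; infer_instance

-- ===== CLAIM (what is proved, stated in full; the proofs are below) =====
def Claim_equal_build_siblings : Prop := ∀ (group_chains : List (String × List (List String))), Dom_build_siblings group_chains → Spec_build_siblings group_chains (build_siblings group_chains)

-- ===== LEMMAS AND PROOFS =====

-- A's inner loop body, as a single step over one token
def pvStepA (d : PySem.Dict String (List String)) (t : String) : PySem.Dict String (List String) :=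
  if PySem.Str.isIn "." t then PySem.Dict.modify d (pvPrefix t) [] (fun s => PySem.Set.add s t) else d

-- A's unconditional step (after the dotted filter is pulled out)
def pvStep' (d : PySem.Dict String (List String)) (t : String) : PySem.Dict String (List String) :=
  PySem.Dict.modify d (pvPrefix t) [] (fun s => PySem.Set.add s t)

lemma pv_foldl_flatten (ls : List (List String)) (d : PySem.Dict String (List String)) :
    ls.foldl (fun d c => c.foldl pvStepA d) d = ls.flatten.foldl pvStepA d := by
  induction ls generalizing d with
  | nil => rfl
  | cons c ls ih => simp [List.flatten_cons, List.foldl_append, ih]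

lemma pv_foldl_outer (gc : List (String × List (List String))) (d : PySem.Dict String (List String)) :
    gc.foldl (fun d pr => pr.2.foldl (fun d c => c.foldl pvStepA d) d) d
      = (gc.flatMap (fun pr => pr.2.flatten)).foldl pvStepA d := by
  induction gc generalizing d with
  | nil => rfl
  | cons pr gc ih =>
    rw [List.foldl_cons, ih, List.flatMap_cons, List.foldl_append, pv_foldl_flatten]

lemma pv_filter_flatten (p : String → Bool) (ls : List (List String)) :
    ls.flatMap (fun c => c.filter p) = ls.flatten.filter p := by
  induction ls with
  | nil => rfl
  | cons c ls ih => simp [List.flatMap_cons, List.flatten_cons, List.filter_append, ih]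

lemma pv_filter_flatMap2 (p : String → Bool) (gc : List (String × List (List String))) :
    gc.flatMap (fun pr => pr.2.flatMap (fun c => c.filter p)) = (gc.flatMap (fun pr => pr.2.flatten)).filter p := by
  induction gc with
  | nil => rfl
  | cons pr gc ih => rw [List.flatMap_cons, List.flatMap_cons, pv_filter_flatten, ih, List.filter_append]

lemma pv_getD_fold (l : List String) (d : PySem.Dict String (List String)) (p : String) :
    (l.foldl pvStep' d).getD p []
      = (l.filter (fun t => pvPrefix t == p)).foldl PySem.Set.add (d.getD p []) := by
  induction l generalizing d with
  | nil => rfl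
  | cons t l ih =>
    simp only [List.foldl_cons, List.filter_cons, ih, pvStep']
    by_cases h : pvPrefix t = p
    · simp [h]
    · have : (pvPrefix t == p) = false := by simp [h]
      simp [this, PySem.Dict.getD_modify, Ne.symm h]


-- filtering a sorted duplicate-free list = sorting the set of the filtered list
lemma pv_sorted_filter (l : List String) (q : String → Bool) :
    PySem.List.sorted (PySem.Set.ofList (l.filter q)) (fun x => x) false
      = (PySem.List.sorted (PySem.Set.ofList l) (fun x => x) false).filter q := by
  apply PySem.List.sorted_eq_of_perm_of_pairwise_lt
  · apply (List.perm_ext_iff_of_nodup ?_ ?_).mpr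
    · intro x
      simp [List.mem_filter, PySem.List.mem_sorted, PySem.Set.mem_ofList, and_comm]
    · exact (PySem.List.sorted_ofList_pairwise_lt l (κ := String)).nodup.filter q
    · exact PySem.Set.nodup_ofList _
  · exact (PySem.List.sorted_ofList_pairwise_lt l (κ := String)).filter q

-- ===== VERDICT (by name: the statement is the Claim_ definition above) =====
theorem build_siblings_spec : Claim_equal_build_siblings := by
  intro gc _
  unfold Spec_build_siblings build_siblings build_siblings_alt
  -- the three nested loops are one fold over the flattened token list
  have h1 : (gc.foldl (fun d pr => pr.2.foldl (fun d c => c.foldl pvStepA d) d) PySem.Dict.empty)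
      = ((gc.flatMap (fun pr => pr.2.flatten)).filter (fun t => PySem.Str.isIn "." t)).foldl pvStep' PySem.Dict.empty := by
    rw [pv_foldl_outer]
    exact PySem.List.foldl_if_eq_foldl_filter _ _ _ _
  set l := (gc.flatMap (fun pr => pr.2.flatten)).filter (fun t => PySem.Str.isIn "." t) with hl
  have htoks : gc.flatMap (fun pr => pr.2.flatMap (fun c => c.filter (fun t => PySem.Str.isIn "." t))) = l := by
    rw [hl]
    exact pv_filter_flatMap2 _ gc
  show (gc.foldl (fun d pr => pr.2.foldl (fun d c => c.foldl (fun d t =>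
        if PySem.Str.isIn "." t then PySem.Dict.modify d (pvPrefix t) [] (fun s => PySem.Set.add s t) else d) d) d)
        PySem.Dict.empty).items.map _ = _
  rw [show (fun (d : PySem.Dict String (List String)) (t : String) =>
        if PySem.Str.isIn "." t then PySem.Dict.modify d (pvPrefix t) [] (fun s => PySem.Set.add s t) else d) = pvStepA from rfl,
      h1, htoks]
  set d := l.foldl pvStep' PySem.Dict.empty with hd
  have hnd : d.keys.Nodup := by
    rw [hd]
    exact PySem.Dict.nodup_keys_foldl_modify_key l pvPrefix [] (fun d t s => PySem.Set.add s t) PySem.Dict.empty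
      (by simp [PySem.Dict.keys_empty])
  have hkeys : d.keys = PySem.List.dedup (l.map pvPrefix) := by
    rw [hd]
    unfold pvStep'
    rw [PySem.Dict.keys_foldl_modify_key (key := pvPrefix) (f := fun _ t => fun s => PySem.Set.add s t), PySem.List.dedup_eq_ofList]
    simp [PySem.Dict.keys_empty, PySem.Set.update_nil_left]
  rw [PySem.Dict.items_eq_map_keys d hnd [], hkeys, List.map_map]
  apply List.map_congr_left
  intro p _
  simp only [Function.comp]
  have hval : d.getD p [] = PySem.Set.ofList (l.filter (fun t => pvPrefix t == p)) := by
    rw [hd, pv_getD_fold]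
    simp [PySem.Dict.getD_empty, PySem.Set.ofList_eq_foldl]
  rw [hval, pv_sorted_filter]
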